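-- pv_equiv track=rewrite | github.com/a-maksimov/stepik_algos | algorithms_drop_one_and_five.py | drop_one_and_five
-- ===== SOURCE A (Python) =====
-- def drop_one_and_five(n):
--     res = 0
--     place = 1
--     while n:
--         digit = n % 10
--         n //= 10
--         if digit in [1, 5]:
--             continue
--         res += place * digit
--         place *= 10
--
--     return res
-- ===== SOURCE B (Python) =====
-- def drop_one_and_five(n):
--     out = 0
--     for c in str(n):
--         if c not in '15':
--             out = out * 10 + (ord(c) - ord('0'))
--     return out
-- ===== Notes on version B (the rewrite author's own statement) =====
-- stated objective: idiomatic
-- what changed: Replaces the arithmetic digit-extraction loop (%10, //10 with a place counter, LSB-first) by converting n to its decimal string and folding over the characters MSB-first with a Horner multiply-accumulate, skipping '1' and '5'.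
import Mathlib
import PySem

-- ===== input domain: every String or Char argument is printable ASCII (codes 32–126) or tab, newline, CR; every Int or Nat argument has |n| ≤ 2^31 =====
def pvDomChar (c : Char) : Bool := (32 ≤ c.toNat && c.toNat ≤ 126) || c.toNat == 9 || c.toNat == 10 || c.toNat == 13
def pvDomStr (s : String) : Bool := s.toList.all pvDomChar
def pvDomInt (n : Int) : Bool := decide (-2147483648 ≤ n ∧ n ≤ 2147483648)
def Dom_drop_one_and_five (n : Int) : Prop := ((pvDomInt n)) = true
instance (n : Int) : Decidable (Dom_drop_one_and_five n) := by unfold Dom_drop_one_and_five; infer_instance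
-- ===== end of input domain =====

-- B replaces A's %10 / //10 place-counter loop by folding over str(n) MSB-first with a
-- Horner multiply-accumulate that skips '1' and '5' (objective: idiomatic; same cost).

-- ===== PORT A =====
-- A's while-loop; the `0 < n` guard totalizes it (Python's `while n` never exits for n < 0,
-- those inputs are excluded by Pre_ below).
def dofLoop (n res place : Int) : Int :=
  if h : 0 < n then
    let digit := PySem.Int.mod n 10
    if digit = 1 ∨ digit = 5 then
      dofLoop (PySem.Int.floordiv n 10) res place
    else
      dofLoop (PySem.Int.floordiv n 10) (res + place * digit) (place * 10)
  else res
termination_by n.toNat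
decreasing_by
  · simp only [PySem.Int.floordiv, Int.fdiv_eq_ediv]; omega
  · simp only [PySem.Int.floordiv, Int.fdiv_eq_ediv]; omega

def drop_one_and_five (n : Int) : Int := dofLoop n 0 1

-- ===== PORT B =====
-- fold over str(n): out = out*10 + (ord(c) - ord('0')) for every c not in '15'
def drop_one_and_five_alt (n : Int) : Int :=
  (PySem.Int.toStr n).toList.foldl
    (fun out c => if c ≠ '1' ∧ c ≠ '5' then out * 10 + ((c.toNat : Int) - 48) else out) 0

-- ===== PRECONDITION & SPEC =====
-- Pre_ excludes n < 0: there Python A's `while n` loop never terminates (n //= 10 stabilises at -1).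
def Pre_drop_one_and_five (n : Int) : Prop := 0 ≤ n
instance (n : Int) : Decidable (Pre_drop_one_and_five n) := by unfold Pre_drop_one_and_five; infer_instance
def pvWitness_drop_one_and_five : Int := (1502)

def Spec_drop_one_and_five (n : Int) (out : Int) : Prop := out = drop_one_and_five_alt n
instance (n : Int) (out : Int) : Decidable (Spec_drop_one_and_five n out) := by unfold Spec_drop_one_and_five; infer_instance

-- ===== CLAIM (what is proved, stated in full; the proofs are below) =====
def Claim_equal_drop_one_and_five : Prop := ∀ (n : Int), Dom_drop_one_and_five n → Pre_drop_one_and_five n → Spec_drop_one_and_five n (drop_one_and_five n)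

-- ===== LEMMAS AND PROOFS =====

-- value of an LSB-first digit list, as an integer
def pvV : List ℕ → ℤ
  | [] => 0
  | d :: t => d + 10 * pvV t

def pvKeep (d : ℕ) : Bool := decide (d ≠ 1 ∧ d ≠ 5)

theorem pv_mod_cast (m : ℕ) : PySem.Int.mod (↑m) 10 = ↑(m % 10) := by
  simp only [PySem.Int.mod, Int.fmod_eq_emod]
  omega

theorem pv_div_cast (m : ℕ) : PySem.Int.floordiv (↑m) 10 = ↑(m / 10) := by
  simp only [PySem.Int.floordiv, Int.fdiv_eq_ediv]
  omega

-- A's loop computes res + place * (value of the kept digits of m)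
theorem dofLoop_eq (m : ℕ) : ∀ res place : ℤ,
    dofLoop (↑m) res place = res + place * pvV ((Nat.digits 10 m).filter pvKeep) := by
  induction m using Nat.strong_induction_on with
  | _ m ih =>
    intro res place
    by_cases hm : 0 < m
    · rw [dofLoop]
      have hpos : (0:ℤ) < ↑m := by exact_mod_cast hm
      rw [dif_pos hpos, pv_mod_cast, pv_div_cast]
      have hdig := Nat.digits_def' (by norm_num : 1 < 10) hm
      have hlt : m / 10 < m := Nat.div_lt_self hm (by norm_num)
      by_cases h15 : m % 10 = 1 ∨ m % 10 = 5
      · have hcond : ((↑(m % 10) : ℤ) = 1 ∨ (↑(m % 10) : ℤ) = 5) := by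
          rcases h15 with h | h <;> simp [h]
        rw [if_pos hcond, ih _ hlt, hdig]
        have : pvKeep (m % 10) = false := by
          rcases h15 with h | h <;> simp [pvKeep, h]
        simp [List.filter, this]
      · have hcond : ¬ ((↑(m % 10) : ℤ) = 1 ∨ (↑(m % 10) : ℤ) = 5) := by
          push Not at h15 ⊢
          exact ⟨by exact_mod_cast h15.1, by exact_mod_cast h15.2⟩
        rw [if_neg hcond, ih _ hlt, hdig]
        have : pvKeep (m % 10) = true := by
          push Not at h15; simp [pvKeep, h15.1, h15.2]
        simp only [List.filter, this, pvV]
        ring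
    · have hm0 : m = 0 := by omega
      subst hm0
      rw [dofLoop]
      simp [pvV]

-- Nat.toDigitsCore, given enough fuel, produces the decimal digits MSB-first
theorem toDigitsCore_eq : ∀ (f m : ℕ), 0 < m → m < f → ∀ acc : List Char,
    Nat.toDigitsCore 10 f m acc = ((Nat.digits 10 m).map Nat.digitChar).reverse ++ acc := by
  intro f
  induction f with
  | zero => intro m hm hf; omega
  | succ f ih =>
    intro m hm hf acc
    rw [Nat.toDigitsCore]
    have hdig := Nat.digits_def' (by norm_num : 1 < 10) hm
    by_cases h0 : m / 10 = 0
    · have h10 : m < 10 := by omega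
      have : Nat.digits 10 (m / 10) = [] := by simp [h0]
      simp [h0, hdig, Nat.mod_eq_of_lt h10]
    · have hpos : 0 < m / 10 := Nat.pos_of_ne_zero h0
      have hflt : m / 10 < f := by
        have : m / 10 < m := Nat.div_lt_self hm (by norm_num)
        omega
      rw [if_neg h0, ih (m / 10) hpos hflt]
      rw [hdig]
      simp

theorem digitChar_toNat {d : ℕ} (h : d < 10) : ((Nat.digitChar d).toNat : ℤ) - 48 = ↑d := by
  interval_cases d <;> decide

theorem digitChar_ne {d : ℕ} (h : d < 10) :
    ((Nat.digitChar d ≠ '1' ∧ Nat.digitChar d ≠ '5') ↔ pvKeep d = true) := by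
  interval_cases d <;> simp [pvKeep] <;> decide

-- fold over digit characters = fold over the numeric digits
theorem foldl_chars_eq (l : List ℕ) (hl : ∀ d ∈ l, d < 10) : ∀ a : ℤ,
    (l.map Nat.digitChar).foldl
      (fun out c => if c ≠ '1' ∧ c ≠ '5' then out * 10 + ((c.toNat : Int) - 48) else out) a
    = l.foldl (fun out d => if pvKeep d then out * 10 + (d : ℤ) else out) a := by
  induction l with
  | nil => intro a; rfl
  | cons d t ih =>
    intro a
    have hd : d < 10 := hl d (List.mem_cons_self ..)
    have ht : ∀ x ∈ t, x < 10 := fun x hx => hl x (List.mem_cons_of_mem _ hx)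
    simp only [List.map, List.foldl]
    rw [ih ht]
    congr 1
    by_cases hk : pvKeep d = true
    · rw [if_pos ((digitChar_ne hd).mpr hk), if_pos hk, digitChar_toNat hd]
    · rw [if_neg (fun h => hk ((digitChar_ne hd).mp h)), if_neg hk]

-- Horner fold over the reversed digit list = value of the kept digits
theorem foldl_reverse_eq (l : List ℕ) : ∀ a : ℤ,
    l.reverse.foldl (fun out d => if pvKeep d then out * 10 + (d : ℤ) else out) a
    = a * 10 ^ (l.filter pvKeep).length + pvV (l.filter pvKeep) := by
  induction l with
  | nil => intro a; simp [pvV]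
  | cons d t ih =>
    intro a
    simp only [List.reverse_cons, List.foldl_append, List.foldl_cons, List.foldl_nil]
    rw [ih a]
    by_cases hk : pvKeep d = true
    · simp only [List.filter, hk, if_true, List.length_cons, pvV]
      ring
    · simp only [List.filter, Bool.not_eq_true] at *
      simp [hk]

theorem alt_eq (m : ℕ) : drop_one_and_five_alt (↑m) = pvV ((Nat.digits 10 m).filter pvKeep) := by
  unfold drop_one_and_five_alt
  rw [PySem.Int.toList_toStr]
  have hchars : PySem.Int.toChars (↑m) = Nat.toDigits 10 m := by
    simp [PySem.Int.toChars]
  rw [hchars]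
  by_cases hm : 0 < m
  · have : Nat.toDigits 10 m = ((Nat.digits 10 m).map Nat.digitChar).reverse := by
      rw [Nat.toDigits, toDigitsCore_eq (m + 1) m hm (by omega) []]
      simp
    rw [this, ← List.map_reverse,
        foldl_chars_eq _ (fun d hd => Nat.digits_lt_base (by norm_num)
          (List.mem_reverse.mp hd |> fun h => h)) 0,
        foldl_reverse_eq]
    simp
  · have hm0 : m = 0 := by omega
    subst hm0
    decide

-- ===== VERDICT (by name: the statement is the Claim_ definition above) =====
theorem drop_one_and_five_spec : Claim_equal_drop_one_and_five := by
  intro n _ hpre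
  obtain ⟨m, rfl⟩ := Int.eq_ofNat_of_zero_le hpre
  unfold Spec_drop_one_and_five drop_one_and_five
  rw [dofLoop_eq, alt_eq]
  ring
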